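-- pv_equiv track=rewrite | github.com/erankavija/just-in-time | scripts/migrate_timestamps.py | find_timestamps_from_events
-- ===== SOURCE A (Python) =====
-- from typing import Optional, Dict, Tuple
--
-- def find_timestamps_from_events(issue_id: str, events: list) -> Tuple[Optional[str], Optional[str]]:
--     """
--     Find created_at and updated_at from event log for given issue.
--
--     Returns:
--         (created_at, updated_at) tuple or (None, None) if not found
--     """
--     created_at = None
--     updated_at = None
--
--     # Filter events for this issue
--     issue_events = [e for e in events if e.get('issue_id') == issue_id]
--
--     if not issue_events:
--         return None, None
--
--     # Find issue_created event for created_at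
--     for event in issue_events:
--         if event.get('event_type') == 'issue_created':
--             created_at = event.get('timestamp')
--             break
--
--     # Most recent event timestamp for updated_at
--     # Events are in chronological order (append-only log)
--     if issue_events:
--         updated_at = issue_events[-1].get('timestamp')
--
--     return created_at, updated_at
-- ===== SOURCE B (Python) =====
-- def find_timestamps_from_events(issue_id, events):
--     """Single pass: no intermediate filtered list, no indexing."""
--     created_at = None
--     updated_at = None
--     created_found = False
--     for event in events:
--         if event.get('issue_id') == issue_id:
--             updated_at = event.get('timestamp')
--             if not created_found and event.get('event_type') == 'issue_created':
--                 created_at = event.get('timestamp')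
--                 created_found = True
--     return created_at, updated_at
-- ===== Notes on version B (the rewrite author's own statement) =====
-- stated objective: simpler
-- what changed: Replaced A's filtered intermediate list plus two follow-up scans (first issue_created, last element via [-1]) by one pass over events maintaining created/updated accumulators; no list is built and nothing is indexed.
import Mathlib
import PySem

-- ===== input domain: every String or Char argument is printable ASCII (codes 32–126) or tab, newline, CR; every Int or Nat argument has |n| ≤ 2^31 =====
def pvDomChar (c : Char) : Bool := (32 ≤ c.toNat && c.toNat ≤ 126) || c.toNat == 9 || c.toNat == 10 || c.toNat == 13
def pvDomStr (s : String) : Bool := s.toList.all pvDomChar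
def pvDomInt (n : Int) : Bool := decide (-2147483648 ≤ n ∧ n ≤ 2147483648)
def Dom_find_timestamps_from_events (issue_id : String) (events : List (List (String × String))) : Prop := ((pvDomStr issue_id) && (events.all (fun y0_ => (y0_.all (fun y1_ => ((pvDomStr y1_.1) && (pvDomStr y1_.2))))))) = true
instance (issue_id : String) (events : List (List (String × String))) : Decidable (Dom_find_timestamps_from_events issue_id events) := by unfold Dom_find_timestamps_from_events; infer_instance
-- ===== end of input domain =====

-- B replaces A's filtered intermediate list plus two follow-up scans by one accumulator pass (simpler; same result).


-- ===== PORT A =====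
-- A's for-loop with break over the filtered list: first issue_created event's timestamp
def pvFindCreated (issue_events : List (List (String × String))) : Option String :=
  match issue_events with
  | [] => none
  | e :: rest =>
    if (PySem.Dict.mk e).get? "event_type" == some "issue_created" then
      (PySem.Dict.mk e).get? "timestamp"
    else pvFindCreated rest

def find_timestamps_from_events (issue_id : String) (events : List (List (String × String))) : Option String × Option String :=
  let issue_events := events.filter (fun e => (PySem.Dict.mk e).get? "issue_id" == some issue_id)
  if issue_events.isEmpty then (none, none)
  else
    let created_at := pvFindCreated issue_events
    let updated_at := (PySem.Dict.mk (PySem.List.pyGetD issue_events (-1) [])).get? "timestamp"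
    (created_at, updated_at)

-- ===== PORT B =====
def find_timestamps_from_events_alt (issue_id : String) (events : List (List (String × String))) : Option String × Option String :=
  let r := events.foldl (fun (acc : Option String × Option String × Bool) event =>
    if (PySem.Dict.mk event).get? "issue_id" == some issue_id then
      let updated := (PySem.Dict.mk event).get? "timestamp"
      if !acc.2.2 && ((PySem.Dict.mk event).get? "event_type" == some "issue_created") then
        ((PySem.Dict.mk event).get? "timestamp", updated, true)
      else (acc.1, updated, acc.2.2)
    else acc) (none, none, false)
  (r.1, r.2.1)

-- ===== PRECONDITION & SPEC =====
def Spec_find_timestamps_from_events (issue_id : String) (events : List (List (String × String))) (out : Option String × Option String) : Prop := out = find_timestamps_from_events_alt issue_id events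
instance (issue_id : String) (events : List (List (String × String))) (out : Option String × Option String) : Decidable (Spec_find_timestamps_from_events issue_id events out) := by unfold Spec_find_timestamps_from_events; infer_instance

-- ===== CLAIM (what is proved, stated in full; the proofs are below) =====
def Claim_equal_find_timestamps_from_events : Prop := ∀ (issue_id : String) (events : List (List (String × String))), Dom_find_timestamps_from_events issue_id events → Spec_find_timestamps_from_events issue_id events (find_timestamps_from_events issue_id events)

-- ===== LEMMAS AND PROOFS =====

-- proof-side abbreviations for the three lookups
def pvP (issue_id : String) (e : List (String × String)) : Bool :=
  (PySem.Dict.mk e).get? "issue_id" == some issue_id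
def pvQ (e : List (String × String)) : Bool :=
  (PySem.Dict.mk e).get? "event_type" == some "issue_created"
def pvTs (e : List (String × String)) : Option String :=
  (PySem.Dict.mk e).get? "timestamp"

-- B's loop body, named
def pvStep (issue_id : String) (acc : Option String × Option String × Bool)
    (e : List (String × String)) : Option String × Option String × Bool :=
  if pvP issue_id e then
    if !acc.2.2 && pvQ e then (pvTs e, pvTs e, true)
    else (acc.1, pvTs e, acc.2.2)
  else acc

-- first issue_created event, with a found marker
def pvFC (issue_events : List (List (String × String))) : Option (Option String) :=
  match issue_events with
  | [] => none
  | e :: rest => if pvQ e then some (pvTs e) else pvFC rest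

-- last matching event's timestamp, with default
def pvLU (issue_id : String) (evs : List (List (String × String))) (u : Option String) : Option String :=
  evs.foldl (fun u e => if pvP issue_id e then pvTs e else u) u

theorem pvStep_eq (issue_id : String) :
    (fun (acc : Option String × Option String × Bool) event =>
      if (PySem.Dict.mk event).get? "issue_id" == some issue_id then
        let updated := (PySem.Dict.mk event).get? "timestamp"
        if !acc.2.2 && ((PySem.Dict.mk event).get? "event_type" == some "issue_created") then
          ((PySem.Dict.mk event).get? "timestamp", updated, true)
        else (acc.1, updated, acc.2.2)
      else acc) = pvStep issue_id := by
  funext acc e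
  simp [pvStep, pvP, pvQ, pvTs]

theorem pvFindCreated_eq_fc (ie : List (List (String × String))) :
    pvFindCreated ie = (pvFC ie).elim none id := by
  induction ie with
  | nil => rfl
  | cons e rest ih =>
    simp only [pvFindCreated, pvFC, pvQ, pvTs]
    split <;> simp [ih]

theorem pvLU_nil_of_empty (issue_id : String) (xs : List (List (String × String))) (d : Option String)
    (h : xs.filter (pvP issue_id) = []) : pvLU issue_id xs d = d := by
  induction xs generalizing d with
  | nil => rfl
  | cons x xt ih =>
    rw [List.filter_cons] at h
    by_cases hp : pvP issue_id x
    · simp [hp] at h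
    · simp only [hp, Bool.false_eq_true] at h
      simp only [pvLU, List.foldl_cons, hp, Bool.false_eq_true, if_false] at *
      exact ih d h

theorem pvLU_eq_last (issue_id : String) (evs : List (List (String × String))) (u : Option String)
    (h : evs.filter (pvP issue_id) ≠ []) :
    pvLU issue_id evs u = pvTs ((evs.filter (pvP issue_id)).getLast h) := by
  induction evs generalizing u with
  | nil => simp at h
  | cons e rest ih =>
    by_cases hp : pvP issue_id e
    · have hstep : pvLU issue_id (e :: rest) u = pvLU issue_id rest (pvTs e) := by
        simp [pvLU, hp]
      have hf : (e :: rest).filter (pvP issue_id) = e :: rest.filter (pvP issue_id) := by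
        simp [hp]
      by_cases hr : rest.filter (pvP issue_id) = []
      · rw [hstep, pvLU_nil_of_empty issue_id rest (pvTs e) hr]
        congr 1
        rw [List.getLast_congr _ _ (by rw [hf, hr])]
        · rfl
        · simp
      · rw [hstep, ih (pvTs e) hr]
        congr 1
        rw [List.getLast_congr _ _ hf]
        exact (List.getLast_cons hr).symm
    · have hstep : pvLU issue_id (e :: rest) u = pvLU issue_id rest u := by
        simp [pvLU, hp]
      have hf : (e :: rest).filter (pvP issue_id) = rest.filter (pvP issue_id) := by
        simp [hp]
      have hr : rest.filter (pvP issue_id) ≠ [] := by rwa [hf] at h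
      rw [hstep, ih u hr]
      congr 1
      exact (List.getLast_congr _ _ hf).symm

theorem pvFold_found (issue_id : String) (evs : List (List (String × String)))
    (c u : Option String) :
    evs.foldl (pvStep issue_id) (c, u, true) = (c, pvLU issue_id evs u, true) := by
  induction evs generalizing u with
  | nil => rfl
  | cons e rest ih =>
    by_cases hp : pvP issue_id e <;> simp [pvStep, pvLU, hp, List.foldl_cons, ih]

theorem pvFold_char (issue_id : String) (evs : List (List (String × String)))
    (c u : Option String) :
    evs.foldl (pvStep issue_id) (c, u, false) =
      ((pvFC (evs.filter (pvP issue_id))).elim c id,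
       pvLU issue_id evs u,
       (pvFC (evs.filter (pvP issue_id))).isSome) := by
  induction evs generalizing c u with
  | nil => rfl
  | cons e rest ih =>
    by_cases hp : pvP issue_id e
    · by_cases hq : pvQ e
      · simp only [List.foldl_cons, pvStep, hp, hq, if_pos, Bool.not_false, Bool.true_and]
        rw [pvFold_found]
        simp [hp, pvFC, hq, pvLU]
      · simp only [List.foldl_cons, pvStep, hp, hq, if_pos, Bool.not_false, Bool.true_and,
          Bool.false_eq_true, if_false]
        rw [ih]
        simp [hp, pvFC, hq, pvLU]
    · simp only [List.foldl_cons, pvStep, hp, Bool.false_eq_true, if_false]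
      rw [ih]
      simp [hp, pvLU]

-- ===== VERDICT (by name: the statement is the Claim_ definition above) =====
theorem find_timestamps_from_events_spec : Claim_equal_find_timestamps_from_events := by
  intro issue_id events _
  unfold Spec_find_timestamps_from_events find_timestamps_from_events find_timestamps_from_events_alt
  rw [pvStep_eq issue_id, pvFold_char]
  have hfeq : (fun e => (PySem.Dict.mk e).get? "issue_id" == some issue_id) = pvP issue_id := rfl
  rw [hfeq]
  by_cases h : events.filter (pvP issue_id) = []
  · rw [if_pos (by simp [h]), pvLU_nil_of_empty issue_id events none h, h]
    rfl
  · rw [if_neg (by simp [h]), pvFindCreated_eq_fc, pvLU_eq_last issue_id events none h,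
        PySem.List.pyGetD_neg_one (h := h)]
    rfl
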